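-- pv_equiv track=rewrite | github.com/Vaiterius/N-Word-Counter-Bot | bot/cogs/nword_counter.py | count_nwords
-- ===== SOURCE A (Python) =====
-- import string
--
-- def count_nwords(msg: str) -> int:
--     """Return occurrences of n-words in a given message"""
--     count = 0
--     msg = msg.lower().strip().translate(  # Cleanse all whitespaces.
--         {ord(char): "" for char in string.whitespace}
--     )
--
--     n_words = [  # Don't cancel me for typing this.
--         "nigga", "/\/igga", "|\/igga",
--         "nigger", "/\/igger", "|\/igger"
--     ]
--     for word in n_words:
--         count += msg.count(word)
--
--     return count
-- ===== SOURCE B (Python) =====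
-- import string
--
--
-- def count_nwords(msg: str) -> int:
--     """Return occurrences of n-words in a given message"""
--     # Cleanse: lowercase, strip, drop every whitespace character.
--     msg = "".join(
--         ch for ch in msg.lower().strip() if ch not in string.whitespace
--     )
--
--     words = (
--         "nigga", "/\/igga", "|\/igga",
--         "nigger", "/\/igger", "|\/igger"
--     )
--
--     # One sweep over the suffixes of the cleansed text: at each suffix, add 1
--     # if some word starts there.  This equals the sum of per-word
--     # non-overlapping counts because no word is a prefix of another (at most
--     # one word starts at any position) and no word overlaps itself.
--     total = 0
--     s = msg
--     while s:
--         if any(s.startswith(w) for w in words):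
--             total += 1
--         s = s[1:]
--     return total
-- ===== Notes on version B (the rewrite author's own statement) =====
-- stated objective: alternative
-- what changed: Replaces the six independent str.count passes with a single accumulator sweep over the suffixes of the cleansed text that adds 1 wherever any of the six words starts (valid because no word is a prefix of another and none self-overlaps, both proved in Lean).
import Mathlib
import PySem

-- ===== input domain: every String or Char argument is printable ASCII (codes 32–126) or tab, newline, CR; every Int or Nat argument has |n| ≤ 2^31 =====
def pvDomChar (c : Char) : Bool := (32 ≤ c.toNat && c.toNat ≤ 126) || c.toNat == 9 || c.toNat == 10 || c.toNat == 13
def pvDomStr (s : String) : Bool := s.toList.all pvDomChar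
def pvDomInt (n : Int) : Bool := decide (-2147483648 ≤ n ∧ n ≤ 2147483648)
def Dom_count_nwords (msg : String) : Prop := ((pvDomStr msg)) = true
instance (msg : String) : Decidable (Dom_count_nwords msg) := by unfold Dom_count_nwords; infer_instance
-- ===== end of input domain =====

-- B replaces the six independent .count passes by one accumulator sweep over the
-- suffixes of the cleansed text, adding 1 where any word starts (alternative, same cost).

-- ===== PORT A =====
-- string.whitespace = ' \t\n\r\v\f'
def nwWhitespace : List Char := [' ', '\t', '\n', '\r', '\x0b', '\x0c']

-- msg.lower().strip().translate({ord(c): "" for c in string.whitespace}) —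
-- a translate table sending each whitespace code point to "" deletes exactly
-- those characters, i.e. it is the per-character deletion filter (exact).
def nwCleanse (msg : String) : List Char :=
  (PySem.Chars.strip (PySem.Chars.lower msg.toList)).filter
    (fun c => !(nwWhitespace.contains c))

-- the six literals (Python "/\/igga" is the seven chars / \ / i g g a)
def nwWords : List (List Char) :=
  ["nigga".toList, "/\\/igga".toList, "|\\/igga".toList,
   "nigger".toList, "/\\/igger".toList, "|\\/igger".toList]

def count_nwords (msg : String) : Int :=
  let m := nwCleanse msg
  -- for word in n_words: count += msg.count(word)
  nwWords.foldl (fun count word => count + (PySem.Chars.count m word : Int)) 0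

-- ===== PORT B =====
-- "".join(ch for ch in msg.lower().strip() if ch not in string.whitespace):
-- keep exactly the characters outside the six-char whitespace string (exact).
def bCleanse (msg : String) : List Char :=
  (PySem.Chars.strip (PySem.Chars.lower msg.toList)).filter
    (fun ch => !([' ', '\t', '\n', '\r', '\x0b', '\x0c'].contains ch))

def bWords : List (List Char) :=
  ["nigga".toList, "/\\/igga".toList, "|\\/igga".toList,
   "nigger".toList, "/\\/igger".toList, "|\\/igger".toList]

-- while s: if any(s.startswith(w) for w in words): total += 1; s = s[1:]
def bSweep (total : Int) : List Char → Int
  | [] => total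
  | c :: rest =>
      bSweep (if bWords.any (fun w => PySem.Chars.startswith (c :: rest) w)
              then total + 1 else total) rest

def count_nwords_alt (msg : String) : Int :=
  bSweep 0 (bCleanse msg)

-- ===== PRECONDITION & SPEC =====
def Spec_count_nwords (msg : String) (out : Int) : Prop := out = count_nwords_alt msg
instance (msg : String) (out : Int) : Decidable (Spec_count_nwords msg out) := by unfold Spec_count_nwords; infer_instance

-- ===== CLAIM (what is proved, stated in full; the proofs are below) =====
def Claim_equal_count_nwords : Prop := ∀ (msg : String), Dom_count_nwords msg → Spec_count_nwords msg (count_nwords msg)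

-- ===== LEMMAS AND PROOFS =====

-- w has no self-overlap: no nontrivial suffix-drop of w is a prefix of w
def nwNoBorder (w : List Char) : Prop :=
  ∀ i, i < w.length → 0 < i → ¬ (w.drop i <+: w)

-- Python's non-overlapping .count of a borderless word = number of all start positions
theorem nw_go_eq (w : List Char) (hw : w ≠ []) (hb : nwNoBorder w) :
    ∀ (fuel : Nat) (s : List Char) (acc : Nat), s.length ≤ fuel →
      PySem.Chars.count.go w fuel s acc
        = acc + (List.range s.length).countP (fun i => w.isPrefixOf (s.drop i)) := by
  intro fuel
  induction fuel with
  | zero =>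
    intro s acc hlen
    have : s = [] := List.eq_nil_of_length_eq_zero (Nat.le_zero.mp hlen)
    subst this; simp [PySem.Chars.count.go]
  | succ f ih =>
    intro s acc hlen
    cases s with
    | nil => simp [PySem.Chars.count.go]
    | cons h t =>
      by_cases hp : w.isPrefixOf (h :: t)
      · -- match at position 0: skip w.length characters
        have hpre : w <+: (h :: t) := List.isPrefixOf_iff_prefix.mp hp
        have hk1 : 1 ≤ w.length := by
          cases w with
          | nil => exact absurd rfl hw
          | cons a b => simp
        have hkn : w.length ≤ (h :: t).length := hpre.length_le
        have hrec := ih (List.drop w.length (h :: t)) (acc + 1)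
          (by rw [List.length_drop]; simp at hlen; simp; omega)
        have hstep : PySem.Chars.count.go w (f + 1) (h :: t) acc
            = PySem.Chars.count.go w f (List.drop w.length (h :: t)) (acc + 1) := by
          simp [PySem.Chars.count.go, hp]
        rw [hstep, hrec]
        -- index arithmetic: positions 1 .. w.length-1 cannot match (no border)
        set n := (h :: t).length with hn
        have hsplit : List.range n = List.range w.length
            ++ (List.range (n - w.length)).map (fun x => w.length + x) := by
          rw [← List.range_add]
          congr 1
          omega
        have hhead : (List.range w.length).countP
            (fun i => w.isPrefixOf ((h :: t).drop i)) = 1 := by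
          have hcongr : ∀ i ∈ List.range w.length,
              (w.isPrefixOf ((h :: t).drop i) = true ↔ (i == 0) = true) := by
            intro i hi
            rw [List.mem_range] at hi
            simp only [beq_iff_eq]
            constructor
            · intro habs
              by_contra h0
              have hpos : 0 < i := Nat.pos_of_ne_zero h0
              obtain ⟨r, hr⟩ := hpre
              have hdrop : (h :: t).drop i = w.drop i ++ r := by
                rw [← hr, List.drop_append_of_le_length (Nat.le_of_lt hi)]
              have h1 : w.drop i <+: (h :: t).drop i := by
                rw [hdrop]; exact List.prefix_append _ _
              have h2 : w <+: (h :: t).drop i := List.isPrefixOf_iff_prefix.mp habs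
              have h3 : w.drop i <+: w :=
                List.prefix_of_prefix_length_le h1 h2 (by simp)
              exact hb i hi hpos h3
            · intro h0; subst h0; simpa using hp
          calc (List.range w.length).countP (fun i => w.isPrefixOf ((h :: t).drop i))
              = (List.range w.length).countP (fun i => i == 0) :=
                List.countP_congr hcongr
            _ = (List.range w.length).count 0 := by
                simp [List.count]
            _ = 1 := List.count_eq_one_of_mem (List.nodup_range)
                (by rw [List.mem_range]; omega)
        have htail : ((List.range (n - w.length)).map (fun x => w.length + x)).countP
            (fun i => w.isPrefixOf ((h :: t).drop i))
            = (List.range (((h :: t).drop w.length).length)).countP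
                (fun i => w.isPrefixOf (((h :: t).drop w.length).drop i)) := by
          rw [List.countP_map]
          have hlen' : ((h :: t).drop w.length).length = n - w.length := by
            simp [hn]
          rw [hlen']
          apply List.countP_congr
          intro i _
          simp [Function.comp, List.drop_drop, Nat.add_comm]
        rw [hsplit, List.countP_append, hhead, htail]
        omega
      · -- no match at position 0: advance one character
        have hstep : PySem.Chars.count.go w (f + 1) (h :: t) acc
            = PySem.Chars.count.go w f t acc := by
          simp [PySem.Chars.count.go, hp]
        rw [hstep, ih t acc (by simp at hlen; omega)]
        have : (List.range (h :: t).length).countP (fun i => w.isPrefixOf ((h :: t).drop i))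
            = (List.range t.length).countP (fun i => w.isPrefixOf (t.drop i)) := by
          have : (h :: t).length = t.length + 1 := rfl
          rw [this, List.range_succ_eq_map, List.countP_cons, List.countP_map]
          have h0 : (w.isPrefixOf ((h :: t).drop 0)) = false := by
            simp only [List.drop_zero]; simp [hp]
          simp only [List.drop_zero]
          have : ∀ i ∈ List.range t.length,
              (((fun i => w.isPrefixOf ((h :: t).drop i)) ∘ Nat.succ) i = true
                ↔ (fun i => w.isPrefixOf (t.drop i)) i = true) := by
            intro i _; simp [Function.comp]
          rw [List.countP_congr this]
          simp [hp]
        rw [this]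

theorem nw_count_eq (w : List Char) (hw : w ≠ []) (hb : nwNoBorder w) (s : List Char) :
    PySem.Chars.count s w
      = (List.range s.length).countP (fun i => w.isPrefixOf (s.drop i)) := by
  have : w.isEmpty = false := by simpa using hw
  simp only [PySem.Chars.count, this, Bool.false_eq_true, if_false]
  simpa using nw_go_eq w hw hb s.length s 0 (le_refl _)

-- a disjoint 'or' of counted predicates splits the count
theorem nw_countP_or_of_disjoint {α : Type} (l : List α) (p q : α → Bool)
    (h : ∀ x ∈ l, ¬ (p x = true ∧ q x = true)) :
    l.countP (fun x => p x || q x) = l.countP p + l.countP q := by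
  induction l with
  | nil => simp
  | cons a l ih =>
    have ha := h a (List.mem_cons_self)
    have ih' := ih (fun x hx => h x (List.mem_cons_of_mem _ hx))
    simp only [List.countP_cons, ih']
    cases hp : p a <;> cases hq : q a <;> simp_all <;> omega

-- if at each element at most one word of W tests true, counting 'any' = summing the counts
theorem nw_countP_any_eq_sum {α : Type} (W : List (List Char)) (l : List α)
    (f : α → List Char → Bool) (hnd : W.Nodup)
    (h : ∀ x ∈ l, ∀ w ∈ W, ∀ w' ∈ W, f x w = true → f x w' = true → w = w') :
    l.countP (fun x => W.any (fun w => f x w))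
      = (W.map (fun w => l.countP (fun x => f x w))).sum := by
  induction W with
  | nil => simp
  | cons w W ih =>
    have hdisj : ∀ x ∈ l, ¬ (f x w = true ∧ (W.any (fun w' => f x w')) = true) := by
      intro x hx ⟨h1, h2⟩
      rw [List.any_eq_true] at h2
      obtain ⟨w', hw', h2⟩ := h2
      have := h x hx w (List.mem_cons_self) w' (List.mem_cons_of_mem _ hw') h1 h2
      rw [this] at hnd
      exact (List.nodup_cons.mp hnd).1 hw'
    have := nw_countP_or_of_disjoint l (fun x => f x w) (fun x => W.any (fun w' => f x w')) hdisj
    simp only [List.any_cons, List.map_cons, List.sum_cons]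
    rw [this, ih (List.nodup_cons.mp hnd).2
      (fun x hx w1 hw1 w2 hw2 => h x hx w1 (List.mem_cons_of_mem _ hw1) w2 (List.mem_cons_of_mem _ hw2))]

-- no word of the list is a prefix of a different word of the list
theorem nw_no_cross_prefix :
    ∀ w ∈ nwWords, ∀ w' ∈ nwWords, w ≠ w' → ¬ (w <+: w') := by decide

theorem nw_unique_match (t : List Char) :
    ∀ w ∈ nwWords, ∀ w' ∈ nwWords,
      w.isPrefixOf t = true → w'.isPrefixOf t = true → w = w' := by
  intro w hw w' hw' h1 h2
  by_contra hne
  have h1' := List.isPrefixOf_iff_prefix.mp h1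
  have h2' := List.isPrefixOf_iff_prefix.mp h2
  rcases Nat.le_total w.length w'.length with hle | hle
  · exact nw_no_cross_prefix w hw w' hw' hne
      (List.prefix_of_prefix_length_le h1' h2' hle)
  · exact nw_no_cross_prefix w' hw' w hw (fun h => hne h.symm)
      (List.prefix_of_prefix_length_le h2' h1' hle)

theorem nw_words_ok : ∀ w ∈ nwWords, w ≠ [] ∧ nwNoBorder w := by
  unfold nwNoBorder; decide

-- A's sum of per-word counts = number of positions where some word starts
theorem nw_main (s : List Char) :
    (nwWords.map (fun w => PySem.Chars.count s w)).sum
      = (List.range s.length).countP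
          (fun i => nwWords.any (fun w => PySem.Chars.startswith (s.drop i) w)) := by
  have hstart : ∀ i w, PySem.Chars.startswith (s.drop i) w = w.isPrefixOf (s.drop i) := by
    intro i w; rfl
  simp only [hstart]
  rw [nw_countP_any_eq_sum nwWords (List.range s.length)
    (fun i w => w.isPrefixOf (s.drop i)) (by decide)
    (fun i _ w hw w' hw' h1 h2 => nw_unique_match (s.drop i) w hw w' hw' h1 h2)]
  congr 1
  apply List.map_congr_left
  intro w hw
  exact nw_count_eq w (nw_words_ok w hw).1 (nw_words_ok w hw).2 s

-- the positional count over a cons splits off the head test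
theorem nw_countP_range_cons (q : List Char → Bool) (c : Char) (t : List Char) :
    (List.range (c :: t).length).countP (fun i => q ((c :: t).drop i))
      = (if q (c :: t) then 1 else 0)
        + (List.range t.length).countP (fun i => q (t.drop i)) := by
  have hlen : (c :: t).length = t.length + 1 := rfl
  rw [hlen, List.range_succ_eq_map, List.countP_cons, List.countP_map]
  have hcongr : ∀ i ∈ List.range t.length,
      (((fun i => q ((c :: t).drop i)) ∘ Nat.succ) i = true
        ↔ (fun i => q (t.drop i)) i = true) := by
    intro i _; simp [Function.comp]
  rw [List.countP_congr hcongr]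
  simp only [List.drop_zero]
  by_cases h : q (c :: t) <;> simp [h] <;> omega

-- B's sweep = accumulator + positional count
theorem nw_sweep_eq (s : List Char) : ∀ (acc : Int),
    bSweep acc s
      = acc + ((List.range s.length).countP
          (fun i => bWords.any (fun w => PySem.Chars.startswith (s.drop i) w)) : Int) := by
  induction s with
  | nil => intro acc; simp [bSweep]
  | cons c t ih =>
    intro acc
    rw [bSweep, ih]
    rw [nw_countP_range_cons (fun u => bWords.any (fun w => PySem.Chars.startswith u w)) c t]
    by_cases h : bWords.any (fun w => PySem.Chars.startswith (c :: t) w) <;>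
      simp [h] <;> push_cast <;> ring

-- ===== VERDICT (by name: the statement is the Claim_ definition above) =====
theorem count_nwords_spec : Claim_equal_count_nwords := by
  intro msg _
  unfold Spec_count_nwords count_nwords count_nwords_alt
  have hclean : bCleanse msg = nwCleanse msg := rfl
  have hwords : bWords = nwWords := rfl
  rw [hclean, nw_sweep_eq, hwords]
  have h := nw_main (nwCleanse msg)
  simp only [nwWords, List.map_cons, List.map_nil, List.sum_cons, List.sum_nil] at h
  simp only [nwWords, List.foldl_cons, List.foldl_nil]
  omega
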